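-- pv_equiv track=rewrite | github.com/sharathb5/free-agents | app/runtime/tools/github_tool.py | _derive_hints
-- ===== SOURCE A (Python) =====
-- from typing import Any, Dict, List, Optional, Protocol
--
-- def _derive_hints(
--     important_files: List[str],
--     all_paths: List[str],
-- ) -> Dict[str, List[str]]:
--     """Derive language/framework hints from file names only. Deterministic."""
--     languages: List[str] = []
--     frameworks: List[str] = []
--     paths_set = set(all_paths)
--     path_names = [p.split("/")[-1].lower() for p in all_paths]
--
--     if any(
--         f in path_names or any(p.endswith(f) for p in paths_set)
--         for f in ("pyproject.toml", "requirements.txt", "setup.py")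
--     ):
--         if any("main.py" in p or "app.py" in p for p in paths_set) or any(
--             p.endswith("main.py") or p.endswith("app.py") for p in paths_set
--         ):
--             languages.append("Python")
--     if "package.json" in path_names or any(p.endswith("package.json") for p in paths_set):
--         languages.append("JavaScript")
--         if any("next.config" in p for p in paths_set):
--             frameworks.append("Next.js")
--         if any("vue.config" in p or "vite.config" in p for p in paths_set):
--             frameworks.append("Vue")
--     if any(
--         p.endswith("openapi.json") or p.endswith("openapi.yaml") or p.endswith("openapi.yml")
--         for p in paths_set
--     ):
--         frameworks.append("API service")
--     if any(p.endswith("Dockerfile") for p in paths_set):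
--         frameworks.append("Docker")
--
--     return {"languages": sorted(languages), "frameworks": sorted(frameworks)}
-- ===== SOURCE B (Python) =====
-- from typing import List, Dict
--
-- def _derive_hints(
--     important_files: List[str],
--     all_paths: List[str],
-- ) -> Dict[str, List[str]]:
--     """One pass over all_paths sets fixed boolean flags; the hint lists are then
--     assembled directly in sorted order (no sorted() call needed)."""
--     py_build = main_app = pkg = nxt = vue = openapi = docker = False
--     for p in all_paths:
--         name = p.split("/")[-1].lower()
--         if name in ("pyproject.toml", "requirements.txt", "setup.py") or \
--                 p.endswith(("pyproject.toml", "requirements.txt", "setup.py")):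
--             py_build = True
--         if "main.py" in p or "app.py" in p:
--             main_app = True
--         if name == "package.json" or p.endswith("package.json"):
--             pkg = True
--         if "next.config" in p:
--             nxt = True
--         if "vue.config" in p or "vite.config" in p:
--             vue = True
--         if p.endswith(("openapi.json", "openapi.yaml", "openapi.yml")):
--             openapi = True
--         if p.endswith("Dockerfile"):
--             docker = True
--     languages = (["JavaScript"] if pkg else []) + (["Python"] if py_build and main_app else [])
--     frameworks = ((["API service"] if openapi else [])
--                   + (["Docker"] if docker else [])
--                   + (["Next.js"] if pkg and nxt else [])
--                   + (["Vue"] if pkg and vue else []))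
--     return {"languages": languages, "frameworks": frameworks}
-- ===== Notes on version B (the rewrite author's own statement) =====
-- stated objective: simpler
-- what changed: A's seven repeated any()-scans over set(all_paths) plus a final sorted() are replaced by one pass over all_paths that sets seven boolean flags (the redundant endswith check subsumed by the substring test is dropped), after which the hint lists are assembled directly in sorted order with no sorted() call.
import Mathlib
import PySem

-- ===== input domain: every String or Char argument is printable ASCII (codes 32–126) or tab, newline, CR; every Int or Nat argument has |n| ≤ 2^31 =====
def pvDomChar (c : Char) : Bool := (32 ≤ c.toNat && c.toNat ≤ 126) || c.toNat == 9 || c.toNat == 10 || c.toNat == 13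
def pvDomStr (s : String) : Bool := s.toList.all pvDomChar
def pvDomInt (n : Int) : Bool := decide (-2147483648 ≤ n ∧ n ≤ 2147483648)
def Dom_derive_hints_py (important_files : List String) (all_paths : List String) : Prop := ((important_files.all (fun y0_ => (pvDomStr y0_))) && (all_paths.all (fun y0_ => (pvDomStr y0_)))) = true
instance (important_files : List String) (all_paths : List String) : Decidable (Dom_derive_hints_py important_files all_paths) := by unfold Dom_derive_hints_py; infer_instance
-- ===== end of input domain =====

-- B replaces A's repeated any()-scans over set(all_paths) by ONE pass setting seven
-- boolean flags and then assembles the (already sorted) hint lists from the flags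
-- without calling sorted(); objective: simpler decomposition, same asymptotic cost.

-- ===== PORT A =====
-- p.split("/")[-1].lower()  (split result is never empty, so [-1] never raises)
def pyBaseLower (p : String) : String :=
  PySem.Str.lower (PySem.List.pyGetD ((PySem.Str.split? p "/").getD []) (-1) "")

def derive_hints_py (important_files : List String) (all_paths : List String) : List (String × List String) :=
  let languages : List String := []
  let frameworks : List String := []
  let paths_set : PySem.Set String := PySem.Set.ofList all_paths
  let path_names : List String := all_paths.map (fun p => pyBaseLower p)
  let languages :=
    if (["pyproject.toml", "requirements.txt", "setup.py"].any (fun f =>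
          path_names.contains f || paths_set.any (fun p => PySem.Str.endswith p f))) then
      if (paths_set.any (fun p => PySem.Str.isIn "main.py" p || PySem.Str.isIn "app.py" p) ||
          paths_set.any (fun p => PySem.Str.endswith p "main.py" || PySem.Str.endswith p "app.py")) then
        languages ++ ["Python"]
      else languages
    else languages
  let lf :=
    if (path_names.contains "package.json" || paths_set.any (fun p => PySem.Str.endswith p "package.json")) then
      let languages := languages ++ ["JavaScript"]
      let frameworks :=
        if paths_set.any (fun p => PySem.Str.isIn "next.config" p) then frameworks ++ ["Next.js"]
        else frameworks
      let frameworks :=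
        if paths_set.any (fun p => PySem.Str.isIn "vue.config" p || PySem.Str.isIn "vite.config" p) then
          frameworks ++ ["Vue"]
        else frameworks
      (languages, frameworks)
    else (languages, frameworks)
  let languages := lf.1
  let frameworks := lf.2
  let frameworks :=
    if paths_set.any (fun p => PySem.Str.endswith p "openapi.json" || PySem.Str.endswith p "openapi.yaml" ||
                               PySem.Str.endswith p "openapi.yml") then
      frameworks ++ ["API service"]
    else frameworks
  let frameworks :=
    if paths_set.any (fun p => PySem.Str.endswith p "Dockerfile") then frameworks ++ ["Docker"]
    else frameworks
  [("languages", PySem.List.sorted languages (fun x => x)),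
   ("frameworks", PySem.List.sorted frameworks (fun x => x))]

-- ===== PORT B =====
-- the seven per-path tests of Source B's loop body
def chkPyBuild (p : String) : Bool :=
  let name := pyBaseLower p
  (name == "pyproject.toml" || name == "requirements.txt" || name == "setup.py") ||
  (PySem.Str.endswith p "pyproject.toml" || PySem.Str.endswith p "requirements.txt" ||
   PySem.Str.endswith p "setup.py")
def chkMainApp (p : String) : Bool := PySem.Str.isIn "main.py" p || PySem.Str.isIn "app.py" p
def chkPkg (p : String) : Bool := pyBaseLower p == "package.json" || PySem.Str.endswith p "package.json"
def chkNext (p : String) : Bool := PySem.Str.isIn "next.config" p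
def chkVue (p : String) : Bool := PySem.Str.isIn "vue.config" p || PySem.Str.isIn "vite.config" p
def chkOpenapi (p : String) : Bool :=
  PySem.Str.endswith p "openapi.json" || PySem.Str.endswith p "openapi.yaml" ||
  PySem.Str.endswith p "openapi.yml"
def chkDocker (p : String) : Bool := PySem.Str.endswith p "Dockerfile"

def bStep (a : Bool × Bool × Bool × Bool × Bool × Bool × Bool) (p : String) :
    Bool × Bool × Bool × Bool × Bool × Bool × Bool :=
  (a.1 || chkPyBuild p, a.2.1 || chkMainApp p, a.2.2.1 || chkPkg p,
   a.2.2.2.1 || chkNext p, a.2.2.2.2.1 || chkVue p, a.2.2.2.2.2.1 || chkOpenapi p,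
   a.2.2.2.2.2.2 || chkDocker p)

def derive_hints_py_alt (important_files : List String) (all_paths : List String) : List (String × List String) :=
  let fl := all_paths.foldl bStep (false, false, false, false, false, false, false)
  let languages :=
    (if fl.2.2.1 then ["JavaScript"] else []) ++ (if fl.1 && fl.2.1 then ["Python"] else [])
  let frameworks :=
    (if fl.2.2.2.2.2.1 then ["API service"] else []) ++
    (if fl.2.2.2.2.2.2 then ["Docker"] else []) ++
    (if fl.2.2.1 && fl.2.2.2.1 then ["Next.js"] else []) ++
    (if fl.2.2.1 && fl.2.2.2.2.1 then ["Vue"] else [])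
  [("languages", languages), ("frameworks", frameworks)]

-- ===== PRECONDITION & SPEC =====
def Spec_derive_hints_py (important_files : List String) (all_paths : List String) (out : List (String × List String)) : Prop := out = derive_hints_py_alt important_files all_paths
instance (important_files : List String) (all_paths : List String) (out : List (String × List String)) : Decidable (Spec_derive_hints_py important_files all_paths out) := by unfold Spec_derive_hints_py; infer_instance

-- ===== CLAIM (what is proved, stated in full; the proofs are below) =====
def Claim_equal_derive_hints_py : Prop := ∀ (important_files : List String) (all_paths : List String), Dom_derive_hints_py important_files all_paths → Spec_derive_hints_py important_files all_paths (derive_hints_py important_files all_paths)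

-- ===== LEMMAS AND PROOFS =====

-- B's single fold computes exactly the seven List.any conditions
theorem foldl_bStep_eq (l : List String) (a : Bool × Bool × Bool × Bool × Bool × Bool × Bool) :
    l.foldl bStep a =
      (a.1 || l.any chkPyBuild, a.2.1 || l.any chkMainApp, a.2.2.1 || l.any chkPkg,
       a.2.2.2.1 || l.any chkNext, a.2.2.2.2.1 || l.any chkVue,
       a.2.2.2.2.2.1 || l.any chkOpenapi, a.2.2.2.2.2.2 || l.any chkDocker) := by
  induction l generalizing a with
  | nil => simp
  | cons x xs ih => simp [bStep, ih, Bool.or_assoc]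

-- any over set(all_paths) is any over all_paths
theorem set_any_eq (l : List String) (f : String → Bool) :
    (PySem.Set.ofList l).any f = l.any f := by
  rw [Bool.eq_iff_iff]
  simp only [List.any_eq_true]
  constructor
  · rintro ⟨x, hx, hf⟩; exact ⟨x, (PySem.Set.mem_ofList l x).mp hx, hf⟩
  · rintro ⟨x, hx, hf⟩; exact ⟨x, (PySem.Set.mem_ofList l x).mpr hx, hf⟩

theorem endswith_imp_isIn (p s : String) :
    PySem.Str.endswith p s = true → PySem.Str.isIn s p = true := by
  simp only [PySem.Str.endswith, PySem.Str.isIn]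
  intro h
  exact (PySem.Chars.isIn_iff_infix s.toList p.toList).mpr
    ((PySem.Chars.endswith_iff p.toList s.toList).mp h).isInfix

-- Python-build condition of A = any chkPyBuild
theorem condPyBuild_eq (l : List String) :
    (["pyproject.toml", "requirements.txt", "setup.py"].any (fun f =>
        (l.map (fun p => pyBaseLower p)).contains f ||
        l.any (fun p => PySem.Str.endswith p f))) = l.any chkPyBuild := by
  rw [Bool.eq_iff_iff]
  simp only [List.any_eq_true, List.contains_eq_mem, List.mem_map, decide_eq_true_eq,
    Bool.or_eq_true, chkPyBuild, List.mem_cons, List.not_mem_nil, or_false, beq_iff_eq]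
  constructor
  · rintro ⟨f, hf, ⟨p, hp, hpf⟩ | ⟨p, hp, hpf⟩⟩ <;>
      refine ⟨p, hp, ?_⟩ <;>
      rcases hf with h | h | h <;> subst h
    · exact Or.inl (Or.inl (Or.inl hpf))
    · exact Or.inl (Or.inl (Or.inr hpf))
    · exact Or.inl (Or.inr hpf)
    · exact Or.inr (Or.inl (Or.inl hpf))
    · exact Or.inr (Or.inl (Or.inr hpf))
    · exact Or.inr (Or.inr hpf)
  · rintro ⟨p, hp, (h | h) | h⟩
    · rcases h with h | h
      · exact ⟨"pyproject.toml", Or.inl rfl, Or.inl ⟨p, hp, h⟩⟩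
      · exact ⟨"requirements.txt", Or.inr (Or.inl rfl), Or.inl ⟨p, hp, h⟩⟩
    · exact ⟨"setup.py", Or.inr (Or.inr rfl), Or.inl ⟨p, hp, h⟩⟩
    · rcases h with (h | h) | h
      · exact ⟨"pyproject.toml", Or.inl rfl, Or.inr ⟨p, hp, h⟩⟩
      · exact ⟨"requirements.txt", Or.inr (Or.inl rfl), Or.inr ⟨p, hp, h⟩⟩
      · exact ⟨"setup.py", Or.inr (Or.inr rfl), Or.inr ⟨p, hp, h⟩⟩

-- main/app condition of A (substring test subsumes the endswith test) = any chkMainApp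
theorem condMainApp_eq (l : List String) :
    (l.any (fun p => PySem.Str.isIn "main.py" p || PySem.Str.isIn "app.py" p) ||
     l.any (fun p => PySem.Str.endswith p "main.py" || PySem.Str.endswith p "app.py"))
      = l.any chkMainApp := by
  rw [Bool.eq_iff_iff]
  simp only [Bool.or_eq_true, List.any_eq_true, chkMainApp]
  constructor
  · rintro (⟨p, hp, h⟩ | ⟨p, hp, h | h⟩)
    · exact ⟨p, hp, h⟩
    · exact ⟨p, hp, Or.inl (endswith_imp_isIn _ _ h)⟩
    · exact ⟨p, hp, Or.inr (endswith_imp_isIn _ _ h)⟩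
  · rintro ⟨p, hp, h⟩; exact Or.inl ⟨p, hp, h⟩

-- package.json condition of A = any chkPkg
theorem condPkg_eq (l : List String) :
    ((l.map (fun p => pyBaseLower p)).contains "package.json" ||
     l.any (fun p => PySem.Str.endswith p "package.json")) = l.any chkPkg := by
  rw [Bool.eq_iff_iff]
  simp only [Bool.or_eq_true, List.any_eq_true, List.contains_eq_mem, List.mem_map,
    decide_eq_true_eq, chkPkg, beq_iff_eq]
  constructor
  · rintro (⟨p, hp, hpf⟩ | ⟨p, hp, h⟩)
    · exact ⟨p, hp, Or.inl hpf⟩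
    · exact ⟨p, hp, Or.inr h⟩
  · rintro ⟨p, hp, h | h⟩
    · exact Or.inl ⟨p, hp, h⟩
    · exact Or.inr ⟨p, hp, h⟩

-- the remaining four conditions of A are literally the chk tests
theorem anyNext_eq (l : List String) :
    (l.any (fun p => PySem.Str.isIn "next.config" p)) = l.any chkNext := rfl
theorem anyVue_eq (l : List String) :
    (l.any (fun p => PySem.Str.isIn "vue.config" p || PySem.Str.isIn "vite.config" p)) = l.any chkVue := rfl
theorem anyOpenapi_eq (l : List String) :
    (l.any (fun p => PySem.Str.endswith p "openapi.json" || PySem.Str.endswith p "openapi.yaml" ||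
        PySem.Str.endswith p "openapi.yml")) = l.any chkOpenapi := rfl
theorem anyDocker_eq (l : List String) :
    (l.any (fun p => PySem.Str.endswith p "Dockerfile")) = l.any chkDocker := rfl

-- ===== VERDICT (by name: the statement is the Claim_ definition above) =====
theorem derive_hints_py_spec : Claim_equal_derive_hints_py := by
  intro important_files all_paths _
  show _ = _
  simp only [derive_hints_py, derive_hints_py_alt, foldl_bStep_eq, set_any_eq,
    condPyBuild_eq, condMainApp_eq, condPkg_eq, anyNext_eq, anyVue_eq, anyOpenapi_eq, anyDocker_eq, Bool.false_or]
  generalize all_paths.any chkPyBuild = b1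
  generalize all_paths.any chkMainApp = b2
  generalize all_paths.any chkPkg = b3
  generalize all_paths.any chkNext = b4
  generalize all_paths.any chkVue = b5
  generalize all_paths.any chkOpenapi = b6
  generalize all_paths.any chkDocker = b7
  cases b1 <;> cases b2 <;> cases b3 <;> cases b4 <;> cases b5 <;> cases b6 <;> cases b7 <;>
    (simp [PySem.List.sorted, PySem.List.insertBy]; try decide)
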